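-- pv_equiv track=rewrite | github.com/ilkka-torma/diddy | tfg.py | bound_rad
-- ===== SOURCE A (Python) =====
-- def bound_rad(tfg):
--     lrad = 0
--     rrad = 0
--     for a in tfg:
--         alrad, arrad = 0, 0
--         for q in a:
--             alrad = max(alrad, -q[1])
--             arrad = max(arrad, q[1])
--             for c in q[0]:
--                 alrad = max(alrad, -c)
--                 arrad = max(arrad, c)
--         lrad += alrad
--         rrad += arrad
--     return lrad, rrad
-- ===== SOURCE B (Python) =====
-- def bound_rad(tfg):
--     lrad = 0
--     rrad = 0
--     for a in tfg:
--         vals = sorted([0] + [v for q in a for v in (q[1], *q[0])])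
--         lrad -= vals[0]
--         rrad += vals[-1]
--     return lrad, rrad
-- ===== Notes on version B (the rewrite author's own statement) =====
-- stated objective: alternative
-- what changed: Replaces A's dual running-max accumulators (alrad/arrad updated element by element inside nested loops) with a sort-then-pick-endpoints algorithm: each group's values are flattened together with the 0 baseline, sorted, and the group's left/right radii read off as the first and last element of the sorted list; correct because the endpoints of a sorted list are its min and max.
import Mathlib
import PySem

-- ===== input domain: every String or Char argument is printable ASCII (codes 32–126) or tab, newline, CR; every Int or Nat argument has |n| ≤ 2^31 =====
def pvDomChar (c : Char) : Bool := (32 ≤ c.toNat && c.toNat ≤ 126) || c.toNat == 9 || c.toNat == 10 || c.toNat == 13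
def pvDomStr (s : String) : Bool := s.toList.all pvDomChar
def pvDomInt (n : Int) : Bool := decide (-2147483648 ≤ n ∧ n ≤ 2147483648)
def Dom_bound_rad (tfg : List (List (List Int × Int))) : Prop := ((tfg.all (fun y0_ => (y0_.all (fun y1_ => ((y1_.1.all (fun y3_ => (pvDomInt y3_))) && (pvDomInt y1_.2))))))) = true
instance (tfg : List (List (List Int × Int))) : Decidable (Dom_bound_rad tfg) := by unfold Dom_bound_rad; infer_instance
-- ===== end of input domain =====

-- B replaces A's running-max accumulators with sort-then-pick-endpoints per group; objective: alternative (same values, O(n log n) sort).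

-- ===== PORT A =====
-- literal transliteration of A's nested loops over (lrad, rrad) and (alrad, arrad)
def bound_rad (tfg : List (List (List Int × Int))) : Int × Int :=
  let p := tfg.foldl (fun (lr : Int × Int) a =>
    let ala := a.foldl (fun (p : Int × Int) q =>
      let al := max p.1 (-q.2)
      let ar := max p.2 q.2
      q.1.foldl (fun (p : Int × Int) c => (max p.1 (-c), max p.2 c)) (al, ar)) (0, 0)
    (lr.1 + ala.1, lr.2 + ala.2)) (0, 0)
  (p.1, p.2)

-- ===== PORT B =====
-- Source B: for a in tfg: vals = sorted([0] + [v for q in a for v in (q[1], *q[0])]);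
--       lrad -= vals[0]; rrad += vals[-1]
-- vals is seeded with 0 so it is never empty; vals[0] / vals[-1] never raise — .getD 0 is unreachable.
def bound_rad_alt (tfg : List (List (List Int × Int))) : Int × Int :=
  tfg.foldl (fun (lr : Int × Int) a =>
    let vals := PySem.List.sorted ((0 : Int) :: a.flatMap (fun q => q.2 :: q.1)) (fun x => x) false
    (lr.1 - (PySem.List.pyGet? vals 0).getD 0,
     lr.2 + (PySem.List.pyGet? vals (-1)).getD 0)) (0, 0)

-- ===== PRECONDITION & SPEC =====
def Spec_bound_rad (tfg : List (List (List Int × Int))) (out : Int × Int) : Prop := out = bound_rad_alt tfg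
instance (tfg : List (List (List Int × Int))) (out : Int × Int) : Decidable (Spec_bound_rad tfg out) := by unfold Spec_bound_rad; infer_instance

-- ===== CLAIM =====
def Claim_equal_bound_rad : Prop := ∀ (tfg : List (List (List Int × Int))), Dom_bound_rad tfg → Spec_bound_rad tfg (bound_rad tfg)

-- ===== LEMMAS AND PROOFS =====

-- head of sorted(x::t) is the running minimum
theorem sorted_head_eq_foldl_min (x : Int) (t : List Int) :
    (PySem.List.pyGet? (PySem.List.sorted (x :: t) (fun y => y) false) 0).getD 0
      = t.foldl min x := by
  rcases hs : PySem.List.sorted (x :: t) (fun y => y) false with _ | ⟨m, rest⟩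
  · exact absurd ((PySem.List.sorted_eq_nil_iff _ _ _).1 hs) (by simp)
  · rw [PySem.List.pyGet?_zero_cons, Option.getD_some]
    have hle : ∀ y ∈ x :: t, m ≤ y := PySem.List.key_head_sorted_le _ _ hs
    have hm : m ∈ x :: t := by
      rw [← PySem.List.mem_sorted (x :: t) (fun y => y) false, hs]; exact List.mem_cons_self
    have hmin := PySem.List.min?_id_cons x t
    have h1 := PySem.List.min?_isMin hmin m hm
    have h2 := hle _ (PySem.List.min?_mem hmin)
    omega

-- last of sorted(x::t) is the running maximum
theorem sorted_last_eq_foldl_max (x : Int) (t : List Int) :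
    (PySem.List.pyGet? (PySem.List.sorted (x :: t) (fun y => y) false) (-1)).getD 0
      = t.foldl max x := by
  have hlen : (PySem.List.sorted (x :: t) (fun y => y) false).length = t.length + 1 := by
    rw [PySem.List.length_sorted]; simp
  rw [PySem.List.pyGet?_neg_one]
  set s := PySem.List.sorted (x :: t) (fun y => y) false with hsdef
  have hne : s ≠ [] := by intro h; rw [h] at hlen; simp at hlen
  rw [List.getLast?_eq_some_getLast hne, Option.getD_some]
  have hlast : s.getLast hne = s[s.length - 1]'(by omega) := List.getLast_eq_getElem hne
  have hmemL : s.getLast hne ∈ x :: t := by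
    rw [hsdef] at *
    exact (PySem.List.mem_sorted _ _ _ _).1 (List.getLast_mem hne)
  have hub : ∀ y ∈ x :: t, y ≤ s.getLast hne := by
    intro y hy
    have hy' : y ∈ s := (PySem.List.mem_sorted _ _ _ _).2 hy
    obtain ⟨p, hp, hYp⟩ := List.mem_iff_getElem.1 hy'
    rw [hlast, ← hYp]
    exact PySem.List.sorted_id_getElem_mono _ (by omega) (by simp only [← hsdef]; omega)
  have hmax := PySem.List.max?_id_cons x t
  have h1 := PySem.List.max?_isMax hmax _ hmemL
  have h2 := hub _ (PySem.List.max?_mem hmax)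
  omega

-- the elementwise max step over a flat value list
def pvMFold (p : Int × Int) (vs : List Int) : Int × Int :=
  vs.foldl (fun p v => (max p.1 (-v), max p.2 v)) p

theorem pvMFold_eq (vs : List Int) : ∀ (al ar : Int),
    pvMFold (al, ar) vs = (-(vs.foldl min (-al)), vs.foldl max ar) := by
  induction vs with
  | nil => intro al ar; simp [pvMFold]
  | cons v t ih =>
    intro al ar
    have h1 : max al (-v) = -(min (-al) v) := by omega
    simp only [pvMFold, List.foldl_cons] at *
    rw [show (max al (-v), max ar v) = ((-(min (-al) v) : Int), max ar v) by rw [h1]]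
    simpa using ih (-(min (-al) v)) (max ar v)

-- A's inner q-loop equals pvMFold over the flattened values
theorem inner_eq (a : List (List Int × Int)) : ∀ (p : Int × Int),
    a.foldl (fun (p : Int × Int) q =>
      let al := max p.1 (-q.2)
      let ar := max p.2 q.2
      q.1.foldl (fun (p : Int × Int) c => (max p.1 (-c), max p.2 c)) (al, ar)) p
    = pvMFold p (a.flatMap (fun q => q.2 :: q.1)) := by
  induction a with
  | nil => intro p; simp [pvMFold]
  | cons q t ih =>
    intro p
    simp only [List.foldl_cons, List.flatMap_cons, pvMFold, List.foldl_append, List.foldl_cons]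
    exact ih _

-- per group: A's accumulated pair equals (-head, last) of B's sorted list
theorem group_eq (a : List (List Int × Int)) :
    a.foldl (fun (p : Int × Int) q =>
      let al := max p.1 (-q.2)
      let ar := max p.2 q.2
      q.1.foldl (fun (p : Int × Int) c => (max p.1 (-c), max p.2 c)) (al, ar)) (0, 0)
    = (-(PySem.List.pyGet? (PySem.List.sorted ((0:Int) :: a.flatMap (fun q => q.2 :: q.1)) (fun x => x) false) 0).getD 0,
       (PySem.List.pyGet? (PySem.List.sorted ((0:Int) :: a.flatMap (fun q => q.2 :: q.1)) (fun x => x) false) (-1)).getD 0) := by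
  rw [inner_eq, pvMFold_eq, sorted_head_eq_foldl_min, sorted_last_eq_foldl_max]
  norm_num

theorem outer_eq (tfg : List (List (List Int × Int))) : ∀ (lr : Int × Int),
    tfg.foldl (fun (lr : Int × Int) a =>
      let ala := a.foldl (fun (p : Int × Int) q =>
        let al := max p.1 (-q.2)
        let ar := max p.2 q.2
        q.1.foldl (fun (p : Int × Int) c => (max p.1 (-c), max p.2 c)) (al, ar)) (0, 0)
      (lr.1 + ala.1, lr.2 + ala.2)) lr
    = tfg.foldl (fun (lr : Int × Int) a =>
        let vals := PySem.List.sorted ((0 : Int) :: a.flatMap (fun q => q.2 :: q.1)) (fun x => x) false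
        (lr.1 - (PySem.List.pyGet? vals 0).getD 0,
         lr.2 + (PySem.List.pyGet? vals (-1)).getD 0)) lr := by
  induction tfg with
  | nil => intro lr; rfl
  | cons a t ih =>
    intro lr
    simp only [List.foldl_cons]
    rw [group_eq a]
    rw [ih]
    congr 1

-- ===== VERDICT =====
theorem bound_rad_spec : Claim_equal_bound_rad := by
  intro tfg _
  show bound_rad tfg = bound_rad_alt tfg
  simp only [bound_rad, bound_rad_alt]
  rw [outer_eq]
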